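-- pv_equiv track=rewrite | github.com/eee555/Solvable-Minesweeper | minesweeper_master.py | enumerateSub
-- ===== SOURCE A (Python) =====
-- from itertools import combinations
--
-- def enumerateSub(Col , MineNum):
--     #返回长度为Col，其中含有MineNum个1的所有01序列，形状为[[][][][]]
--     Out=[]
--     List=range(0,Col)
--     for i in combinations(List, MineNum):
--         Out.append([0]*Col)
--         for j in range(0,MineNum):
--             Out[-1][i[j]]=1
--     return Out
-- ===== SOURCE B (Python) =====
-- def enumerateSub(Col, MineNum):
--     # Backtracking with an explicit stack: walk positions left to right, trying a 1
--     # (while ones remain) before a 0; this reproduces combinations' lexicographic order.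
--     out = []
--     stack = [(Col, MineNum, [])]
--     while stack:
--         n, k, prefix = stack.pop()
--         if k == 0:
--             out.append(prefix + [0] * n)
--         elif k < 0 or k > n:
--             continue
--         else:
--             stack.append((n - 1, k, prefix + [0]))
--             stack.append((n - 1, k - 1, prefix + [1]))
--     return out
-- ===== Notes on version B (the rewrite author's own statement) =====
-- stated objective: alternative
-- what changed: Replaces building each vector from an itertools.combinations index tuple (allocate [0]*Col, then scatter 1s at the chosen indices) by a recursive backtracking generator that walks positions left to right, trying a 1 (while ones remain) before a 0, which reproduces combinations' lexicographic order directly.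
import Mathlib
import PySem

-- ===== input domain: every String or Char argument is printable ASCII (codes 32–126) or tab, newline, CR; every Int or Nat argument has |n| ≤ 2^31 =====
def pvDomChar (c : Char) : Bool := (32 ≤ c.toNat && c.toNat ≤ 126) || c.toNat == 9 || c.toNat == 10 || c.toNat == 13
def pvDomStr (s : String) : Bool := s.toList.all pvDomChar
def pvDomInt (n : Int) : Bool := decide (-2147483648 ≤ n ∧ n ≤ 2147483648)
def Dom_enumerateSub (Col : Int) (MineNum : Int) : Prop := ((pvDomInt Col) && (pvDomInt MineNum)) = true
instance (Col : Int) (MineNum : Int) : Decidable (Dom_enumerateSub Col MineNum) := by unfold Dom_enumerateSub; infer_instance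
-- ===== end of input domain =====

-- B replaces A's combinations-then-scatter construction by explicit-stack backtracking
-- over positions (1-branch tried before 0-branch); alternative decomposition, not faster.

-- ===== PORT A =====
-- transliteration of A: for each combination i of range(0,Col) taken MineNum at a time,
-- append [0]*Col and set positions i[j] (j in range(0,MineNum)) to 1.
-- MineNum.toNat is exact since Pre_ requires 0 ≤ MineNum (A raises ValueError otherwise);
-- i[j] is a valid nonnegative index for every combination element, so pyGetD/.set is exact here.
def enumerateSub (Col : Int) (MineNum : Int) : List (List Int) :=
  (PySem.List.combinations (PySem.List.pyRange 0 Col 1) MineNum.toNat).map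
    (fun i => (PySem.List.pyRange 0 MineNum 1).foldl
      (fun row j => row.set (PySem.List.pyGetD i j 0).toNat 1)
      (List.replicate Col.toNat 0))

-- ===== PORT B =====
-- transliteration of Source B's while-loop over the explicit stack; the Lean list's head is
-- the Python list's END (append = cons, pop() = head), so the traversal is identical;
-- [0]*n with n possibly < 0 is List.replicate n.toNat 0 (exact: Python gives [] for n ≤ 0)
def loopAlt (stack : List (Int × Int × List Int)) (out : List (List Int)) : List (List Int) :=
  match stack with
  | [] => out
  | (n, k, pfx) :: rest =>
    if _h0 : k = 0 then loopAlt rest (out ++ [pfx ++ List.replicate n.toNat 0])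
    else if _h1 : k < 0 ∨ n < k then loopAlt rest out
    else loopAlt ((n - 1, k - 1, pfx ++ [1]) :: (n - 1, k, pfx ++ [0]) :: rest) out
termination_by (stack.map (fun e => 3 ^ (e.1.toNat + 1))).sum
decreasing_by
  · simp
  · simp
  · simp only [List.map_cons, List.sum_cons]
    have h1 : (n - 1).toNat + 1 = n.toNat := by omega
    have h2 : (0:Nat) < 3 ^ n.toNat := Nat.pow_pos (by omega)
    rw [h1]
    calc 3 ^ n.toNat + (3 ^ n.toNat + (rest.map (fun e => 3 ^ (e.1.toNat + 1))).sum)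
        < 3 * 3 ^ n.toNat + (rest.map (fun e => 3 ^ (e.1.toNat + 1))).sum := by omega
      _ = 3 ^ (n.toNat + 1) + (rest.map (fun e => 3 ^ (e.1.toNat + 1))).sum := by
          rw [pow_succ]; ring

def enumerateSub_alt (Col : Int) (MineNum : Int) : List (List Int) :=
  loopAlt [(Col, MineNum, [])] []

-- ===== PRECONDITION & SPEC =====
-- Pre_ excludes exactly MineNum < 0, where the Python A raises ValueError (itertools.combinations).
def Pre_enumerateSub (Col : Int) (MineNum : Int) : Prop := 0 ≤ MineNum
instance (Col : Int) (MineNum : Int) : Decidable (Pre_enumerateSub Col MineNum) := by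
  unfold Pre_enumerateSub; infer_instance
def pvWitness_enumerateSub : Int × Int := (4, 2)

def Spec_enumerateSub (Col : Int) (MineNum : Int) (out : List (List Int)) : Prop :=
  out = enumerateSub_alt Col MineNum
instance (Col : Int) (MineNum : Int) (out : List (List Int)) : Decidable (Spec_enumerateSub Col MineNum out) := by
  unfold Spec_enumerateSub; infer_instance

-- ===== CLAIM (what is proved, stated in full; the proofs are below) =====
def Claim_equal_enumerateSub : Prop := ∀ (Col : Int) (MineNum : Int), Dom_enumerateSub Col MineNum → Pre_enumerateSub Col MineNum → Spec_enumerateSub Col MineNum (enumerateSub Col MineNum)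
-- ===== LEMMAS AND PROOFS =====

-- proof-side helper: the recursive form of B's backtracking
def vecsAlt (n : Int) (k : Int) : List (List Int) :=
  if _h0 : k = 0 then [List.replicate n.toNat 0]
  else if _h1 : k < 0 ∨ n < k then []
  else ((vecsAlt (n - 1) (k - 1)).map (fun v => 1 :: v)) ++
       ((vecsAlt (n - 1) k).map (fun v => 0 :: v))
termination_by n.toNat
decreasing_by all_goals omega

lemma loopAlt_eq : ∀ (stack : List (Int × Int × List Int)) (out : List (List Int)),
    loopAlt stack out
      = out ++ (stack.map (fun e => (vecsAlt e.1 e.2.1).map (fun v => e.2.2 ++ v))).flatten := by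
  intro stack out
  induction stack, out using loopAlt.induct with
  | case1 out => simp [loopAlt]
  | case2 out n pfx rest ih =>
    rw [loopAlt]
    rw [ih]
    simp only [List.map_cons, List.flatten_cons]
    rw [vecsAlt]
    simp
  | case3 out n k pfx rest h0 h1 ih =>
    rw [loopAlt]
    simp only [dif_neg h0, dif_pos h1]
    rw [ih]
    simp only [List.map_cons, List.flatten_cons]
    rw [vecsAlt]
    simp [dif_neg h0, dif_pos h1]
  | case4 out n k pfx rest h0 h1 ih =>
    rw [loopAlt]
    simp only [dif_neg h0, dif_neg h1]
    rw [ih]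
    simp only [List.map_cons, List.flatten_cons]
    rw [show vecsAlt n k = ((vecsAlt (n - 1) (k - 1)).map (fun v => 1 :: v)) ++
       ((vecsAlt (n - 1) k).map (fun v => 0 :: v)) from by rw [vecsAlt]; simp [dif_neg h0, dif_neg h1]]
    simp [Function.comp_def]

lemma enumerateSub_alt_eq_vecsAlt (Col : Int) (MineNum : Int) :
    enumerateSub_alt Col MineNum = vecsAlt Col MineNum := by
  unfold enumerateSub_alt
  rw [loopAlt_eq]
  simp

def vecsNat : Nat → Nat → List (List Int)
  | n, 0 => [List.replicate n 0]
  | 0, _ + 1 => []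
  | n + 1, k + 1 => ((vecsNat n k).map (fun v => 1 :: v)) ++
                    ((vecsNat n (k + 1)).map (fun v => 0 :: v))

lemma vecsNat_eq_nil : ∀ (n k : Nat), n < k → vecsNat n k = [] := by
  intro n
  induction n with
  | zero => intro k h; match k, h with | k+1, _ => rfl
  | succ n ih =>
    intro k h
    match k, h with
    | k+1, h => simp [vecsNat, ih k (by omega), ih (k+1) (by omega)]

lemma vecsAlt_eq_vecsNat : ∀ (n k : Int), 0 ≤ k → vecsAlt n k = vecsNat n.toNat k.toNat := by
  intro n
  induction hn : n.toNat using Nat.strong_induction_on generalizing n with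
  | _ m ih =>
    intro k hk
    subst hn
    rw [vecsAlt]
    by_cases h0 : k = 0
    · subst h0; simp [vecsNat]
    · rw [dif_neg h0]
      by_cases h1 : k < 0 ∨ n < k
      · rw [dif_pos h1]
        rcases h1 with h1 | h1
        · omega
        · rw [vecsNat_eq_nil _ _ (by omega)]
      · rw [dif_neg h1]
        push Not at h1
        have hrec1 := ih (n-1).toNat (by omega) (n-1) rfl (k-1) (by omega)
        have hrec2 := ih (n-1).toNat (by omega) (n-1) rfl k hk
        rw [hrec1, hrec2]
        have : n.toNat = (n-1).toNat + 1 := by omega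
        have hk' : k.toNat = (k-1).toNat + 1 := by omega
        rw [this, hk', vecsNat]

lemma getElem?_foldl_set (c : List Int) (v : List Int) (i : Nat) :
    (c.foldl (fun row p => row.set p.toNat 1) v)[i]? =
      if c.any (fun p => p.toNat == i) then (if i < v.length then some 1 else none)
      else v[i]? := by
  induction c generalizing v with
  | nil => simp
  | cons p c ih =>
    rw [List.foldl_cons, ih]
    simp only [List.any_cons, List.length_set, List.getElem?_set]
    by_cases hp : p.toNat = i <;> by_cases hc : c.any (fun q => q.toNat == i) <;>
      by_cases hi : i < v.length <;> simp [hp, hc, hi]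

def maskRow (s : Int) (n : Nat) (c : List Int) : List Int :=
  (List.range n).map (fun i : Nat => if (s + (i : Int)) ∈ c then (1 : Int) else 0)

lemma foldl_set_eq_maskRow (c : List Int) (n : Nat) (hp : ∀ p ∈ c, 0 ≤ p) :
    c.foldl (fun row p => row.set p.toNat 1) (List.replicate n (0 : Int)) = maskRow 0 n c := by
  apply List.ext_getElem?
  intro i
  rw [getElem?_foldl_set]
  have hmem : (c.any (fun p => p.toNat == i)) = decide ((0 + (i:Int)) ∈ c) := by
    rw [Bool.eq_iff_iff]
    simp only [List.any_eq_true, beq_iff_eq, decide_eq_true_eq, zero_add]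
    constructor
    · rintro ⟨p, hpc, hpi⟩
      have := hp p hpc
      have hpe : p = (i : Int) := by omega
      rwa [← hpe]
    · intro h; exact ⟨i, h, rfl⟩
  rw [hmem]
  by_cases hi : i < n
  · have hr : (maskRow 0 n c)[i]? = some (if (0+(i:Int)) ∈ c then 1 else 0) := by
      unfold maskRow
      rw [List.getElem?_map, show (List.range n)[i]? = some i from by
        simp [hi]]
      rfl
    rw [hr]
    simp only [List.length_replicate, hi, if_true, decide_eq_true_eq, zero_add,
      List.getElem?_replicate]
    split_ifs <;> simp
  · have h1 : (List.replicate n (0:Int))[i]? = none := by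
      simp [List.getElem?_replicate]; omega
    have h2 : (maskRow 0 n c)[i]? = none := by
      simp [maskRow]; omega
    simp only [List.length_replicate, hi, if_false, h1, h2, ite_self]

lemma maskRow_zero (s : Int) (n : Nat) : maskRow s n [] = List.replicate n 0 := by
  simp [maskRow, List.map_const']

lemma maskRow_cons_self (s : Int) (n : Nat) (c : List Int) :
    maskRow s (n + 1) (s :: c) = 1 :: maskRow (s + 1) n c := by
  unfold maskRow
  rw [List.range_succ_eq_map]
  simp only [List.map_cons, List.map_map, Nat.cast_zero, add_zero, List.mem_cons, true_or]
  congr 1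
  apply List.map_congr_left
  intro i _
  simp only [Function.comp_apply, Nat.succ_eq_add_one]
  have h1 : ¬(s + ((i + 1 : Nat) : Int) = s) := by push_cast; omega
  have h2 : s + ((i + 1 : Nat) : Int) = (s + 1) + (i : Int) := by push_cast; omega
  rw [h2]
  have h3 : ¬(s + 1 + (i : Int) = s) := by omega
  simp [h3]

lemma maskRow_cons_notmem (s : Int) (n : Nat) (c : List Int) (hs : s ∉ c) :
    maskRow s (n + 1) c = 0 :: maskRow (s + 1) n c := by
  unfold maskRow
  rw [List.range_succ_eq_map]
  simp only [List.map_cons, List.map_map, Nat.cast_zero, add_zero, if_neg hs]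
  congr 1
  apply List.map_congr_left
  intro i _
  simp only [Function.comp_apply, Nat.succ_eq_add_one]
  have h2 : s + ((i + 1 : Nat) : Int) = (s + 1) + (i : Int) := by push_cast; omega
  rw [h2]

lemma main_mask : ∀ (n : Nat) (s : Int) (k : Nat),
    (PySem.List.combinations (PySem.List.pyRange s (s + (n : Int)) 1) k).map (maskRow s n)
      = vecsNat n k := by
  intro n
  induction n with
  | zero =>
    intro s k
    rw [show s + ((0 : Nat) : Int) = s by simp, PySem.List.pyRange_one_eq_nil (le_refl s)]
    cases k with
    | zero => simp [PySem.List.combinations_zero, vecsNat, maskRow]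
    | succ k => simp [PySem.List.combinations_nil_succ, vecsNat]
  | succ n ih =>
    intro s k
    have hcons : PySem.List.pyRange s (s + ((n + 1 : Nat) : Int)) 1
        = s :: PySem.List.pyRange (s + 1) ((s + 1) + (n : Int)) 1 := by
      rw [PySem.List.pyRange_one_cons (by push_cast; omega),
        show s + ((n + 1 : Nat) : Int) = (s + 1) + (n : Int) from by push_cast; omega]
    cases k with
    | zero =>
      simp [PySem.List.combinations_zero, vecsNat, maskRow_zero]
    | succ k =>
      rw [hcons, PySem.List.combinations_cons_succ, List.map_append, List.map_map]
      have h1 : ((PySem.List.combinations (PySem.List.pyRange (s + 1) ((s + 1) + (n : Int)) 1) k).map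
          (maskRow s (n + 1) ∘ fun c => s :: c))
          = ((PySem.List.combinations (PySem.List.pyRange (s + 1) ((s + 1) + (n : Int)) 1) k).map
              (maskRow (s + 1) n)).map (fun v => 1 :: v) := by
        rw [List.map_map]
        apply List.map_congr_left
        intro c _
        simp only [Function.comp_apply]
        exact maskRow_cons_self s n c
      have h2 : ((PySem.List.combinations (PySem.List.pyRange (s + 1) ((s + 1) + (n : Int)) 1) (k + 1)).map
          (maskRow s (n + 1)))
          = ((PySem.List.combinations (PySem.List.pyRange (s + 1) ((s + 1) + (n : Int)) 1) (k + 1)).map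
              (maskRow (s + 1) n)).map (fun v => 0 :: v) := by
        rw [List.map_map]
        apply List.map_congr_left
        intro c hc
        simp only [Function.comp_apply]
        apply maskRow_cons_notmem
        intro hs
        have hsub := PySem.List.sublist_of_mem_combinations hc
        have := hsub.subset hs
        rw [PySem.List.mem_pyRange_one] at this
        omega
      rw [h1, h2, ih (s + 1) k, ih (s + 1) (k + 1)]
      rfl

theorem enumerateSub_eq (Col : Int) (MineNum : Int) (hM : 0 ≤ MineNum) :
    enumerateSub Col MineNum = enumerateSub_alt Col MineNum := by
  unfold enumerateSub
  rw [enumerateSub_alt_eq_vecsAlt, vecsAlt_eq_vecsNat Col MineNum hM, ← main_mask Col.toNat 0 MineNum.toNat]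
  have hrange : PySem.List.pyRange 0 Col 1 = PySem.List.pyRange 0 (0 + (Col.toNat : Int)) 1 := by
    rw [PySem.List.pyRange_one, PySem.List.pyRange_one,
      show (Col - 0).toNat = (0 + (Col.toNat : Int) - 0).toNat from by omega]
  rw [hrange]
  apply List.map_congr_left
  intro c hc
  have hlen : c.length = MineNum.toNat := PySem.List.length_of_mem_combinations hc
  have hp : ∀ p ∈ c, 0 ≤ p := by
    intro p hpc
    have := (PySem.List.sublist_of_mem_combinations hc).subset hpc
    rw [PySem.List.mem_pyRange_one] at this
    omega
  have hMlen : MineNum = PySem.List.len c := by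
    simp [PySem.List.len, hlen]; omega
  rw [hMlen]
  exact (PySem.List.foldl_pyRange_zero_pyGetD c 0
    (fun (row : List Int) (p : Int) => row.set p.toNat 1)
    (List.replicate Col.toNat 0)).trans (foldl_set_eq_maskRow c Col.toNat hp)

-- ===== VERDICT (by name: the statement is the Claim_ definition above) =====
theorem enumerateSub_spec : Claim_equal_enumerateSub := by
  intro Col MineNum _ hPre
  unfold Spec_enumerateSub
  exact enumerateSub_eq Col MineNum hPre
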